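-- pv_equiv track=rewrite | github.com/newbloomwon/MichaelChablerL2 | punkt_project/punkt-backend/app/query/parser.py | _tokenize_filter_section
-- ===== SOURCE A (Python) =====
-- from typing import List, Optional, Union
--
-- def _tokenize_filter_section(filter_str: str) -> List[str]:
--     """Tokenize filter section preserving quoted values."""
--     tokens = []
--     current_token = ""
--     in_single_quote = False
--     in_double_quote = False
--     i = 0
--
--     while i < len(filter_str):
--         char = filter_str[i]
--
--         if char == "'" and not in_double_quote:
--             in_single_quote = not in_single_quote
--             current_token += char
--         elif char == '"' and not in_single_quote:
--             in_double_quote = not in_double_quote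
--             current_token += char
--         elif char.isspace() and not (in_single_quote or in_double_quote):
--             if current_token:
--                 tokens.append(current_token)
--                 current_token = ""
--         else:
--             current_token += char
--
--         i += 1
--
--     if current_token:
--         tokens.append(current_token)
--
--     return tokens
-- ===== SOURCE B (Python) =====
-- from typing import List
--
-- def _tokenize_filter_section(filter_str: str) -> List[str]:
--     """Tokenize filter section preserving quoted values."""
--     s = filter_str
--     n = len(s)
--     tokens = []
--     i = 0
--     while i < n:
--         if s[i].isspace():
--             i += 1
--             continue
--         start = i
--         while i < n and not s[i].isspace():
--             c = s[i]
--             if c == "'" or c == '"':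
--                 i += 1
--                 while i < n and s[i] != c:
--                     i += 1
--                 if i < n:
--                     i += 1
--             else:
--                 i += 1
--         tokens.append(s[start:i])
--     return tokens
-- ===== Notes on version B (the rewrite author's own statement) =====
-- stated objective: faster
-- what changed: Replaces A's single character-by-character loop with accumulator string and in_single_quote/in_double_quote boolean flags by a two-level cursor scanner: an outer loop that skips whitespace and slices each token out of the string, with a dedicated inner scan that jumps the cursor past a quoted run to its matching quote; tokens are produced by slicing instead of per-character string concatenation.
import Mathlib
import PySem

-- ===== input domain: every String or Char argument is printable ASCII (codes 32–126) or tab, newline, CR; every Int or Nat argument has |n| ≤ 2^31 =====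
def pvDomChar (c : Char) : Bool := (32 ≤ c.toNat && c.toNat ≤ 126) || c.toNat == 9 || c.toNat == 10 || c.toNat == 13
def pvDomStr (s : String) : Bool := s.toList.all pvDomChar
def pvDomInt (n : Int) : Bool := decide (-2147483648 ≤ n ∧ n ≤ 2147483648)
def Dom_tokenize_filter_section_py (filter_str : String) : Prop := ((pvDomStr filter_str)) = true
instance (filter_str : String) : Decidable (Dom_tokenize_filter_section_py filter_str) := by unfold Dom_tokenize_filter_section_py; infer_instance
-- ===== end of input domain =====

-- B replaces A's flag-machine per-character accumulator loop by a two-level cursor scanner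
-- (skip spaces / slice one token off, with a dedicated quoted-run subscan); measured faster (constant factor).

-- ===== PORT A =====
-- A's while-loop, state = (current_token, in_single_quote, in_double_quote);
-- branches in A's order, tokens emitted at the flush points.
def pvAGo : List Char → List Char → Bool → Bool → List String
  | [], cur, _, _ => if cur = [] then [] else [String.ofList cur]
  | c :: rest, cur, inS, inD =>
    if c = '\'' ∧ inD = false then
      pvAGo rest (cur ++ [c]) (!inS) inD
    else if c = '"' ∧ inS = false then
      pvAGo rest (cur ++ [c]) inS (!inD)
    else if PySem.Chars.isspace c = true ∧ ¬(inS = true ∨ inD = true) then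
      if cur = [] then pvAGo rest [] inS inD
      else String.ofList cur :: pvAGo rest [] inS inD
    else
      pvAGo rest (cur ++ [c]) inS inD

def tokenize_filter_section_py (filter_str : String) : List String :=
  pvAGo filter_str.toList [] false false

-- ===== PORT B =====
-- B's innermost scan: advance the cursor up to and past the closing quote q
-- (or to the end); returns (consumed chars, remainder).
def pvScanQuote (q : Char) : List Char → List Char × List Char
  | [] => ([], [])
  | c :: rest =>
    if c = q then ([c], rest)
    else
      let p := pvScanQuote q rest
      (c :: p.1, p.2)

theorem pvScanQuote_len (q : Char) (l : List Char) : (pvScanQuote q l).2.length ≤ l.length := by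
  induction l with
  | nil => simp [pvScanQuote]
  | cons c rest ih =>
    simp only [pvScanQuote]
    split
    · simp
    · simpa using Nat.le_succ_of_le ih

-- B's middle loop: one maximal run of non-space chars, a quote jumping past its match;
-- returns (the token's chars, remainder).
def pvReadTok : List Char → List Char × List Char
  | [] => ([], [])
  | c :: rest =>
    if PySem.Chars.isspace c = true then ([], c :: rest)
    else if c = '\'' ∨ c = '"' then
      let p := pvScanQuote c rest
      let p2 := pvReadTok p.2
      (c :: (p.1 ++ p2.1), p2.2)
    else
      let p := pvReadTok rest
      (c :: p.1, p.2)
  termination_by l => l.length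
  decreasing_by
    · exact Nat.lt_succ_of_le (pvScanQuote_len c rest)
    · simp

theorem pvReadTok_len (l : List Char) : (pvReadTok l).2.length ≤ l.length := by
  fun_induction pvReadTok l
  case case1 => simp
  case case2 => simp
  case case3 c rest hsp hq p p2 ih =>
    exact Nat.le_succ_of_le (le_trans ih (pvScanQuote_len c rest))
  case case4 c rest hsp hq p ih =>
    exact Nat.le_succ_of_le ih

-- B's outer loop: skip whitespace, otherwise slice off one token.
def pvBGo : List Char → List String
  | [] => []
  | c :: rest =>
    if PySem.Chars.isspace c = true then pvBGo rest
    else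
      String.ofList (pvReadTok (c :: rest)).1 :: pvBGo (pvReadTok (c :: rest)).2
  termination_by l => l.length
  decreasing_by
    · simp
    · rw [pvReadTok]
      split
      · simp_all
      · split
        · exact Nat.lt_succ_of_le (le_trans (pvReadTok_len _) (pvScanQuote_len c rest))
        · exact Nat.lt_succ_of_le (pvReadTok_len rest)

def tokenize_filter_section_py_alt (filter_str : String) : List String :=
  pvBGo filter_str.toList

-- ===== PRECONDITION & SPEC =====
def Spec_tokenize_filter_section_py (filter_str : String) (out : List String) : Prop := out = tokenize_filter_section_py_alt filter_str
instance (filter_str : String) (out : List String) : Decidable (Spec_tokenize_filter_section_py filter_str out) := by unfold Spec_tokenize_filter_section_py; infer_instance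

-- ===== CLAIM (what is proved, stated in full; the proofs are below) =====
def Claim_equal_tokenize_filter_section_py : Prop := ∀ (filter_str : String), Dom_tokenize_filter_section_py filter_str → Spec_tokenize_filter_section_py filter_str (tokenize_filter_section_py filter_str)

-- ===== LEMMAS AND PROOFS =====

-- While A is inside a single quote it appends every char verbatim until the closing
-- quote — exactly the chars pvScanQuote consumes; then both flags are off.
theorem pvAGo_single (l : List Char) (cur : List Char) : pvAGo l cur true false =
    pvAGo (pvScanQuote '\'' l).2 (cur ++ (pvScanQuote '\'' l).1) false false := by
  induction l generalizing cur with
  | nil => simp [pvScanQuote, pvAGo]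
  | cons c rest ih =>
    by_cases hq : c = '\''
    · subst hq; simp [pvScanQuote, pvAGo]
    · simp only [pvScanQuote, if_neg hq, pvAGo]
      rw [if_neg (by simp [hq]), if_neg (by simp), if_neg (by simp)]
      rw [ih]; simp

-- Same for a double quote.
theorem pvAGo_double (l : List Char) (cur : List Char) : pvAGo l cur false true =
    pvAGo (pvScanQuote '"' l).2 (cur ++ (pvScanQuote '"' l).1) false false := by
  induction l generalizing cur with
  | nil => simp [pvScanQuote, pvAGo]
  | cons c rest ih =>
    by_cases hq : c = '"'
    · subst hq; simp [pvScanQuote, pvAGo]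
    · simp only [pvScanQuote, if_neg hq, pvAGo]
      rw [if_neg (by simp), if_neg (by simp [hq]), if_neg (by simp)]
      rw [ih]; simp

-- One unfolding step of B's outer loop through pvReadTok.
theorem pvBGo_eq (l : List Char) : pvBGo l =
    (if (pvReadTok l).1 = [] then [] else [String.ofList (pvReadTok l).1]) ++ pvBGo (pvReadTok l).2 := by
  cases l with
  | nil => simp [pvBGo, pvReadTok]
  | cons c rest =>
    by_cases hsp : PySem.Chars.isspace c = true
    · rw [pvReadTok, if_pos hsp]
      simp
    · rw [pvBGo, if_neg hsp]
      have h1 : (pvReadTok (c :: rest)).1 ≠ [] := by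
        rw [pvReadTok, if_neg hsp]
        split <;> simp
      rw [if_neg h1]
      simp

-- The core invariant: A's loop in the no-quote state, with pending token cur,
-- flushes cur extended by the next token's chars and then behaves like B's outer loop.
theorem pvAGo_readTok : ∀ (n : Nat) (l : List Char) (cur : List Char), l.length ≤ n →
    pvAGo l cur false false =
      (if cur ++ (pvReadTok l).1 = [] then [] else [String.ofList (cur ++ (pvReadTok l).1)])
        ++ pvBGo (pvReadTok l).2 := by
  intro n
  induction n with
  | zero =>
    intro l cur hl
    have : l = [] := List.length_eq_zero_iff.mp (Nat.le_zero.mp hl)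
    subst this
    simp [pvAGo, pvReadTok, pvBGo]
  | succ n ih =>
    intro l cur hl
    cases l with
    | nil => simp [pvAGo, pvReadTok, pvBGo]
    | cons c rest =>
      have hr : rest.length ≤ n := by simpa using Nat.succ_le_succ_iff.mp hl
      by_cases hsp : PySem.Chars.isspace c = true
      · -- whitespace: flush
        have hq1 : c ≠ '\'' := by rintro rfl; revert hsp; decide
        have hq2 : c ≠ '"' := by rintro rfl; revert hsp; decide
        rw [pvReadTok, if_pos hsp]
        rw [pvAGo, if_neg (by simp [hq1]), if_neg (by simp [hq2]), if_pos (by simp [hsp])]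
        have hrest : pvAGo rest [] false false = pvBGo rest := by
          rw [ih rest [] hr]
          simp only [List.nil_append]
          rw [← pvBGo_eq]
        have hB : pvBGo (c :: rest) = pvBGo rest := by rw [pvBGo, if_pos hsp]
        by_cases hc : cur = []
        · subst hc; simp [hrest, hB]
        · rw [if_neg hc]; simp [hc, hrest, hB]
      · by_cases hq1 : c = '\''
        · subst hq1
          have hRT : pvReadTok ('\'' :: rest) =
              ('\'' :: ((pvScanQuote '\'' rest).1 ++ (pvReadTok (pvScanQuote '\'' rest).2).1),
                (pvReadTok (pvScanQuote '\'' rest).2).2) := by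
            rw [pvReadTok, if_neg hsp, if_pos (Or.inl rfl)]
          rw [pvAGo, if_pos (by simp)]
          simp only [Bool.not_false]
          rw [pvAGo_single]
          have hr2 : (pvScanQuote '\'' rest).2.length ≤ n :=
            le_trans (pvScanQuote_len _ _) hr
          rw [ih _ _ hr2, hRT]
          simp
        · by_cases hq2 : c = '"'
          · subst hq2
            have hRT : pvReadTok ('"' :: rest) =
                ('"' :: ((pvScanQuote '"' rest).1 ++ (pvReadTok (pvScanQuote '"' rest).2).1),
                  (pvReadTok (pvScanQuote '"' rest).2).2) := by
              rw [pvReadTok, if_neg hsp, if_pos (Or.inr rfl)]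
            rw [pvAGo, if_neg (by simp), if_pos (by simp)]
            simp only [Bool.not_false]
            rw [pvAGo_double]
            have hr2 : (pvScanQuote '"' rest).2.length ≤ n :=
              le_trans (pvScanQuote_len _ _) hr
            rw [ih _ _ hr2, hRT]
            simp
          · -- ordinary char: append and continue
            have hRT : pvReadTok (c :: rest) = (c :: (pvReadTok rest).1, (pvReadTok rest).2) := by
              rw [pvReadTok, if_neg hsp, if_neg (by simp [hq1, hq2])]
            rw [pvAGo, if_neg (by simp [hq1]), if_neg (by simp [hq2]), if_neg (by simp [hsp])]
            rw [ih _ _ hr, hRT]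
            simp

-- ===== VERDICT (by name: the statement is the Claim_ definition above) =====
theorem tokenize_filter_section_py_spec : Claim_equal_tokenize_filter_section_py := by
  intro s _
  unfold Spec_tokenize_filter_section_py tokenize_filter_section_py tokenize_filter_section_py_alt
  rw [pvAGo_readTok s.toList.length s.toList [] le_rfl]
  simp only [List.nil_append]
  rw [← pvBGo_eq]
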